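-- pv_equiv track=rewrite | github.com/lukelasleyfilm/lukezoom | lukezoom/evaluation/locomo_adapter.py | _heuristic_answer
-- ===== SOURCE A (Python) =====
-- def _heuristic_answer(question: str, context: str) -> str:
--     """
--     Simple heuristic answer extractor (no LLM required).
--
--     Scans context for sentences containing question keywords and
--     returns the best-matching sentence.  This produces lower scores
--     than an LLM-backed answer_fn but enables offline evaluation.
--     """
--     if not context:
--         return ""
--
--     # Extract content words from question
--     stop_words = {
--         "what", "when", "where", "who", "how", "why", "is", "are",
--         "was", "were", "do", "does", "did", "the", "a", "an", "in",
--         "of", "to", "for", "with", "on", "at", "by", "from", "that",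
--         "this", "it", "its", "my", "your", "his", "her", "their",
--     }
--     q_words = {
--         w.lower().strip("?.,!") for w in question.split()
--     } - stop_words
--
--     # Score each sentence
--     sentences = context.replace("\n", " ").split(".")
--     best_score = 0
--     best_sent = ""
--     for sent in sentences:
--         sent = sent.strip()
--         if not sent:
--             continue
--         s_words = {w.lower() for w in sent.split()}
--         overlap = len(q_words & s_words)
--         if overlap > best_score:
--             best_score = overlap
--             best_sent = sent
--
--     return best_sent
-- ===== SOURCE B (Python) =====
-- def _heuristic_answer(question: str, context: str) -> str:
--     """Inverted-index reformulation: map each sentence word to the sentence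
--     indices containing it, score sentences by question-word lookups, then
--     return the first sentence attaining the (positive) maximum score."""
--     stop_words = {
--         "what", "when", "where", "who", "how", "why", "is", "are",
--         "was", "were", "do", "does", "did", "the", "a", "an", "in",
--         "of", "to", "for", "with", "on", "at", "by", "from", "that",
--         "this", "it", "its", "my", "your", "his", "her", "their",
--     }
--     q_words = {w.lower().strip("?.,!") for w in question.split()} - stop_words
--
--     sents = [t for t in (s.strip() for s in context.replace("\n", " ").split(".")) if t]
--
--     index = {}
--     for i, sent in enumerate(sents):
--         for w in {w.lower() for w in sent.split()}:
--             index.setdefault(w, []).append(i)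
--
--     scores = {}
--     for q in q_words:
--         for i in index.get(q, []):
--             scores[i] = scores.get(i, 0) + 1
--
--     best_i, best_s = -1, 0
--     for i in range(len(sents)):
--         v = scores.get(i, 0)
--         if best_s < v:
--             best_i, best_s = i, v
--     return sents[best_i] if best_i >= 0 else ""
-- ===== Notes on version B (the rewrite author's own statement) =====
-- stated objective: alternative
-- what changed: B replaces A's per-sentence question-set/sentence-set intersection and running-best fold with an inverted index from each sentence word to the sentence indices containing it, a score dict accumulated by question-word lookups, and a final first-argmax pass over the sentence indices.
import Mathlib
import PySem

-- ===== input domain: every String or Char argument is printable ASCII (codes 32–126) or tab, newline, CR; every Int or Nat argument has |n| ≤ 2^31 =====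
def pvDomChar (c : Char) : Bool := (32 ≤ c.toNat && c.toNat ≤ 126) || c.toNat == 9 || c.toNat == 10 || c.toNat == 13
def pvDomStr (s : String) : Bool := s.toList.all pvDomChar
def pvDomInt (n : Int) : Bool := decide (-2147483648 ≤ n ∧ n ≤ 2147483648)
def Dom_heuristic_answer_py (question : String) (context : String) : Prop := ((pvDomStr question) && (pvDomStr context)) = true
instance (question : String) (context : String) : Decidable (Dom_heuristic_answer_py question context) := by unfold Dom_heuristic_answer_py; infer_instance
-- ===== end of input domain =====

-- B replaces A's per-sentence set-intersection scan with an inverted index (word -> sentence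
-- indices) plus a score dictionary driven by question-word lookups; alternative decomposition,
-- same exact result.

-- shared helpers: both Pythons build the stop-word set, the question-word set and the
-- per-sentence lowered word set with the identical expressions
def pvStopWords : PySem.Set String :=
  PySem.Set.ofList ["what", "when", "where", "who", "how", "why", "is", "are",
    "was", "were", "do", "does", "did", "the", "a", "an", "in",
    "of", "to", "for", "with", "on", "at", "by", "from", "that",
    "this", "it", "its", "my", "your", "his", "her", "their"]

-- {w.lower().strip("?.,!") for w in question.split()} - stop_words
def pvQWords (question : String) : PySem.Set String :=
  PySem.Set.diff
    (PySem.Set.ofList ((PySem.Str.split₀ question).map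
      (fun w => PySem.Str.stripChars (PySem.Str.lower w) "?.,!")))
    pvStopWords

-- {w.lower() for w in sent.split()}
def pvWordSet (sent : String) : PySem.Set String :=
  PySem.Set.ofList ((PySem.Str.split₀ sent).map PySem.Str.lower)

-- ===== PORT A =====
def heuristic_answer_py (question : String) (context : String) : String :=
  if context = "" then ""
  else
    let q_words := pvQWords question
    -- context.replace("\n", " ").split(".")  (the separator "." is non-empty, split? is `some`)
    let sentences := (PySem.Str.split? (PySem.Str.replace context "\n" " ") ".").getD []
    let r := sentences.foldl (fun (acc : Int × String) sent0 =>
      let sent := PySem.Str.strip sent0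
      if sent = "" then acc
      else
        let s_words := pvWordSet sent
        let overlap := PySem.Set.len (PySem.Set.inter q_words s_words)
        if acc.1 < overlap then (overlap, sent) else acc) (0, "")
    r.2

-- ===== PORT B =====
def heuristic_answer_py_alt (question : String) (context : String) : String :=
  let q_words := pvQWords question
  let sents := (((PySem.Str.split? (PySem.Str.replace context "\n" " ") ".").getD []).map
      PySem.Str.strip).filter (fun t => t ≠ "")
  -- index.setdefault(w, []).append(i)  =  modify w [] (· ++ [i])
  let index := (PySem.List.enumerate sents).foldl
    (fun (d : PySem.Dict String (List Int)) p =>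
      (pvWordSet p.2).foldl (fun d w => d.modify w [] (· ++ [p.1])) d)
    PySem.Dict.empty
  -- scores[i] = scores.get(i, 0) + 1
  let scores := (pvQWords question).foldl
    (fun (sc : PySem.Dict Int Int) q =>
      (index.getD q []).foldl (fun sc i => sc.insert i (sc.getD i 0 + 1)) sc)
    PySem.Dict.empty
  let r := (PySem.List.pyRange 0 (sents.length : Int)).foldl
    (fun (acc : Int × Int) i =>
      let v := scores.getD i 0
      if acc.2 < v then (i, v) else acc) (-1, 0)
  -- sents[best_i] with 0 ≤ best_i < len(sents): pyGetD is exact here (index always in range)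
  if 0 ≤ r.1 then PySem.List.pyGetD sents r.1 "" else ""

-- ===== PRECONDITION & SPEC =====
def Spec_heuristic_answer_py (question : String) (context : String) (out : String) : Prop := out = heuristic_answer_py_alt question context
instance (question : String) (context : String) (out : String) : Decidable (Spec_heuristic_answer_py question context out) := by unfold Spec_heuristic_answer_py; infer_instance

-- ===== CLAIM (what is proved, stated in full; the proofs are below) =====
def Claim_equal_heuristic_answer_py : Prop := ∀ (question : String) (context : String), Dom_heuristic_answer_py question context → Spec_heuristic_answer_py question context (heuristic_answer_py question context)

-- ===== LEMMAS AND PROOFS =====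

-- the score A assigns to a (stripped, non-empty) sentence
def pvOvl (question : String) (sent : String) : Int :=
  PySem.Set.len (PySem.Set.inter (pvQWords question) (pvWordSet sent))

-- all (word, sentence-index) pairs the index build runs through
def pvPairs (sents : List String) : List (String × Int) :=
  (PySem.List.enumerate sents).flatMap (fun p => (pvWordSet p.2).map (fun w => (w, p.1)))

theorem pvIndex_eq (sents : List String) :
    (PySem.List.enumerate sents).foldl
      (fun (d : PySem.Dict String (List Int)) p =>
        (pvWordSet p.2).foldl (fun d w => d.modify w [] (· ++ [p.1])) d)
      PySem.Dict.empty
    = (pvPairs sents).foldl (fun d pr => d.modify pr.1 [] (· ++ [pr.2])) PySem.Dict.empty := by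
  rw [pvPairs, List.foldl_flatMap]
  congr 1
  funext d p
  rw [List.foldl_map]
theorem pvIndex_getD (sents : List String) (q : String) :
    ((pvPairs sents).foldl (fun d pr => d.modify pr.1 [] (· ++ [pr.2]))
      PySem.Dict.empty).getD q []
    = ((pvPairs sents).filter (fun pr => pr.1 == q)).map (·.2) := by
  rw [PySem.Dict.getD_foldl_modify_append]
  simp
theorem pvScores_getD (g : String → List Int) (qs : List String) (sc : PySem.Dict Int Int)
    (i : Int) :
    (qs.foldl (fun sc q => (g q).foldl (fun sc i => sc.insert i (sc.getD i 0 + 1)) sc) sc).getD i 0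
    = sc.getD i 0 + ((qs.map (fun q => ((g q).count i : Int))).sum) := by
  induction qs generalizing sc with
  | nil => simp
  | cons q qs ih =>
    simp only [List.foldl_cons, List.map_cons, List.sum_cons, ih,
      PySem.Dict.getD_foldl_insert_add_one]
    ring
theorem pvEnumCount (l : List String) (s : Int) (p : String → Bool) (i : Int) :
    ((PySem.List.enumerate l s).map
      (fun pr => List.countP (fun w => (pr.1 == i) && p w) (pvWordSet pr.2))).sum
    = if s ≤ i ∧ i < s + l.length then (pvWordSet (l.getD (i - s).toNat "")).countP p else 0 := by
  induction l generalizing s with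
  | nil => simp
  | cons x xs ih =>
    rw [PySem.List.enumerate_cons, List.map_cons, List.sum_cons, ih]
    split_ifs with ha hb hb
    · have hne : (s == i) = false := by simp only [beq_eq_false_iff_ne, ne_eq]; omega
      simp only [hne, Bool.false_and, List.countP_false, Nat.zero_add]
      have ht : (i - s).toNat = (i - (s + 1)).toNat + 1 := by omega
      rw [ht]
      simp
    · exfalso; simp only [List.length_cons] at hb; push_cast at ha hb; omega
    · have hi : i = s := by simp only [List.length_cons] at hb; push_cast at ha hb; omega
      subst hi
      have ht : (i - i).toNat = 0 := by omega
      simp [ht]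
    · have hne : (s == i) = false := by
        simp only [List.length_cons] at hb; push_cast at hb
        simp only [beq_eq_false_iff_ne, ne_eq]; omega
      simp [hne]
theorem pvCount_pairs (sents : List String) (q : String) (i : Nat) (hi : i < sents.length) :
    (((pvPairs sents).filter (fun pr => pr.1 == q)).map (·.2)).count ((i : Nat) : Int)
    = if q ∈ pvWordSet (sents.getD i "") then 1 else 0 := by
  rw [List.count_eq_countP, List.countP_map, List.countP_filter, pvPairs, List.countP_flatMap]
  simp only [Function.comp_def, List.countP_map]
  have h := pvEnumCount sents 0 (fun w => w == q) ((i : Nat) : Int)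
  have hc : ((0:Int) ≤ (i : Int) ∧ (i : Int) < 0 + sents.length) := by push_cast; omega
  rw [if_pos hc] at h
  have ht : (((i:Int) - 0)).toNat = i := by omega
  rw [ht] at h
  rw [h, ← List.count_eq_countP]
  by_cases hm : q ∈ pvWordSet (sents.getD i "")
  · rw [if_pos hm, List.count_eq_one_of_mem (by rw [pvWordSet]; exact PySem.Set.nodup_ofList _) hm]
  · rw [if_neg hm, List.count_eq_zero_of_not_mem hm]
theorem pvOvl_eq_countP (qw : PySem.Set String) (sent : String) :
    PySem.Set.len (PySem.Set.inter qw (pvWordSet sent))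
    = (qw.countP (fun q => decide (q ∈ pvWordSet sent)) : Int) := by
  simp only [PySem.Set.len, PySem.Set.inter]
  rw [Eq.symm List.countP_eq_length_filter]
  congr 1
  apply List.countP_congr
  intro x _
  simp [List.contains_iff_mem]
theorem pvScore_eq_ovl (question : String) (sents : List String) (i : Nat)
    (hi : i < sents.length) :
    ((pvQWords question).foldl
      (fun (sc : PySem.Dict Int Int) q =>
        (((PySem.List.enumerate sents).foldl
          (fun (d : PySem.Dict String (List Int)) p =>
            (pvWordSet p.2).foldl (fun d w => d.modify w [] (· ++ [p.1])) d)
          PySem.Dict.empty).getD q []).foldl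
          (fun sc i => sc.insert i (sc.getD i 0 + 1)) sc)
      PySem.Dict.empty).getD ((i : Nat) : Int) 0
    = pvOvl question (sents.getD i "") := by
  rw [pvIndex_eq, pvScores_getD, PySem.Dict.getD_empty]
  have hmap : ∀ q : String,
      ((((pvPairs sents).foldl (fun d pr => d.modify pr.1 [] (· ++ [pr.2]))
        PySem.Dict.empty).getD q []).count ((i : Nat) : Int) : Int)
      = if q ∈ pvWordSet (sents.getD i "") then (1 : Int) else 0 := by
    intro q
    rw [pvIndex_getD, pvCount_pairs sents q i hi]
    split_ifs <;> simp
  simp only [hmap]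
  have := PySem.List.sum_map_ite_one_zero (fun q => decide (q ∈ pvWordSet (sents.getD i ""))) (pvQWords question)
  simp only [decide_eq_true_eq] at this
  rw [this, pvOvl, pvOvl_eq_countP]
  simp
theorem pvSelect (L : List String) (F : String → Int) :
    (L.foldl (fun (acc : Int × String) s => if acc.1 < F s then (F s, s) else acc) (0, "")).1
      = ((PySem.List.pyRange 0 (L.length : Int)).foldl
          (fun (acc : Int × Int) i =>
            if acc.2 < F (PySem.List.pyGetD L i "") then (i, F (PySem.List.pyGetD L i ""))
            else acc) (-1, 0)).2
    ∧ (let b := (PySem.List.pyRange 0 (L.length : Int)).foldl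
          (fun (acc : Int × Int) i =>
            if acc.2 < F (PySem.List.pyGetD L i "") then (i, F (PySem.List.pyGetD L i ""))
            else acc) (-1, 0)
       let a := L.foldl (fun (acc : Int × String) s => if acc.1 < F s then (F s, s) else acc) (0, "")
       (b.1 = -1 ∧ a.2 = "") ∨ (0 ≤ b.1 ∧ b.1 < L.length ∧ a.2 = PySem.List.pyGetD L b.1 "")) := by
  induction L using List.reverseRecOn with
  | nil =>
    have h0 : PySem.List.pyRange 0 ((List.length ([] : List String) : Int)) = [] := by
      simp [PySem.List.pyRange_zero]
    rw [h0]
    exact ⟨rfl, Or.inl ⟨rfl, rfl⟩⟩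
  | append_singleton L x ih =>
    have hlen : ((L ++ [x]).length : Int) = (L.length : Int) + 1 := by simp
    rw [hlen, PySem.List.pyRange_one_succ_right (by positivity)]
    have hsame : ∀ (acc : Int × Int) i, i ∈ PySem.List.pyRange 0 (L.length : Int) →
        (fun (acc : Int × Int) i =>
          if acc.2 < F (PySem.List.pyGetD (L ++ [x]) i "") then (i, F (PySem.List.pyGetD (L ++ [x]) i ""))
          else acc) acc i
        = (fun (acc : Int × Int) i =>
          if acc.2 < F (PySem.List.pyGetD L i "") then (i, F (PySem.List.pyGetD L i ""))
          else acc) acc i := by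
      intro acc i hi
      rw [PySem.List.mem_pyRange_one] at hi
      have : PySem.List.pyGetD (L ++ [x]) i "" = PySem.List.pyGetD L i "" := by
        have h0 : i = ((i.toNat : Nat) : Int) := by omega
        rw [h0, PySem.List.pyGetD_natCast, PySem.List.pyGetD_natCast,
          List.getD_append _ _ _ _ (by omega)]
      simp only [this]
    rw [List.foldl_append, List.foldl_append, List.foldl_cons, List.foldl_nil,
      List.foldl_cons, List.foldl_nil, PySem.List.foldl_congr_mem _ _ _ _ hsame]
    obtain ⟨h1, h2⟩ := ih
    simp only at h2 ⊢
    set a := L.foldl (fun (acc : Int × String) s => if acc.1 < F s then (F s, s) else acc) (0, "") with ha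
    set b := (PySem.List.pyRange 0 (L.length : Int)).foldl
          (fun (acc : Int × Int) i =>
            if acc.2 < F (PySem.List.pyGetD L i "") then (i, F (PySem.List.pyGetD L i ""))
            else acc) (-1, 0) with hb
    have hx : PySem.List.pyGetD (L ++ [x]) (L.length : Int) "" = x := by
      rw [PySem.List.pyGetD_natCast, List.getD_append_right _ _ _ _ (le_refl _)]
      simp
    rw [hx, ← h1]
    by_cases hu : a.1 < F x
    · rw [if_pos hu, if_pos hu]
      refine ⟨rfl, Or.inr ⟨by positivity, by simp, hx.symm⟩⟩
    · rw [if_neg hu, if_neg hu]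
      refine ⟨h1, ?_⟩
      rcases h2 with ⟨hb1, ha2⟩ | ⟨hb1, hb2, ha2⟩
      · exact Or.inl ⟨hb1, ha2⟩
      · refine Or.inr ⟨hb1, by omega, ?_⟩
        rw [ha2]
        have h0 : b.1 = ((b.1.toNat : Nat) : Int) := by omega
        rw [h0, PySem.List.pyGetD_natCast, PySem.List.pyGetD_natCast,
          List.getD_append _ _ _ _ (by omega)]
theorem pvAlt_empty (question : String) : heuristic_answer_py_alt question "" = "" := by
  have hs : ((((PySem.Str.split? (PySem.Str.replace "" "\n" " ") ".").getD []).map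
      PySem.Str.strip).filter (fun t => t ≠ "")) = [] := by decide
  rw [heuristic_answer_py_alt]
  simp only [hs]
  rfl
theorem pvA_fold_strip (l : List String) (g : (Int × String) → String → (Int × String))
    (acc : Int × String) :
    l.foldl (fun acc s0 =>
      if PySem.Str.strip s0 = "" then acc else g acc (PySem.Str.strip s0)) acc
    = ((l.map PySem.Str.strip).filter (fun t => t ≠ "")).foldl g acc := by
  induction l generalizing acc with
  | nil => rfl
  | cons x xs ih =>
    simp only [List.map_cons, List.filter_cons, List.foldl_cons]
    by_cases h : PySem.Str.strip x = ""
    · simp [h, ih]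
    · simp [h, ih]

-- ===== VERDICT (by name: the statement is the Claim_ definition above) =====
theorem heuristic_answer_py_spec : Claim_equal_heuristic_answer_py := by
  intro question context _
  unfold Spec_heuristic_answer_py
  by_cases hctx : context = ""
  · subst hctx
    rw [heuristic_answer_py, if_pos rfl, pvAlt_empty]
  · rw [heuristic_answer_py, if_neg hctx, heuristic_answer_py_alt]
    simp only []
    set F : String → Int := fun s =>
      PySem.Set.len (PySem.Set.inter (pvQWords question) (pvWordSet s)) with hF
    rw [pvA_fold_strip _ (fun acc s => if acc.1 < F s then (F s, s) else acc)]
    set sents := (((PySem.Str.split? (PySem.Str.replace context "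
" " ") ".").getD []).map
      PySem.Str.strip).filter (fun t => t ≠ "") with hsents
    have hcong : ∀ (acc : Int × Int), ∀ i ∈ PySem.List.pyRange 0 (sents.length : Int),
        (fun (acc : Int × Int) i =>
          if acc.2 < ((pvQWords question).foldl
            (fun (sc : PySem.Dict Int Int) q =>
              (((PySem.List.enumerate sents).foldl
                (fun (d : PySem.Dict String (List Int)) p =>
                  (pvWordSet p.2).foldl (fun d w => d.modify w [] (· ++ [p.1])) d)
                PySem.Dict.empty).getD q []).foldl
                (fun sc i => sc.insert i (sc.getD i 0 + 1)) sc)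
            PySem.Dict.empty).getD i 0 then
            (i, ((pvQWords question).foldl
            (fun (sc : PySem.Dict Int Int) q =>
              (((PySem.List.enumerate sents).foldl
                (fun (d : PySem.Dict String (List Int)) p =>
                  (pvWordSet p.2).foldl (fun d w => d.modify w [] (· ++ [p.1])) d)
                PySem.Dict.empty).getD q []).foldl
                (fun sc i => sc.insert i (sc.getD i 0 + 1)) sc)
            PySem.Dict.empty).getD i 0)
          else acc) acc i
        = (fun (acc : Int × Int) i =>
            if acc.2 < F (PySem.List.pyGetD sents i "") then (i, F (PySem.List.pyGetD sents i ""))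
            else acc) acc i := by
      intro acc i hi
      rw [PySem.List.mem_pyRange_one] at hi
      have h0 : i = ((i.toNat : Nat) : Int) := by omega
      have hlt : i.toNat < sents.length := by omega
      rw [h0]
      beta_reduce
      rw [pvScore_eq_ovl question sents i.toNat hlt, PySem.List.pyGetD_natCast, pvOvl, hF]
    rw [PySem.List.foldl_congr_mem _ _ _ _ hcong]
    obtain ⟨h1, h2⟩ := pvSelect sents F
    simp only at h2
    rcases h2 with ⟨hb1, ha2⟩ | ⟨hb1, hb2, ha2⟩
    · rw [ha2, if_neg (by rw [hb1]; norm_num)]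
    · rw [ha2, if_pos hb1]
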